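-- pv_equiv track=rewrite | github.com/satria64/gestfatture | fatturapa_generator.py | encode_progressivo
-- ===== SOURCE A (Python) =====
-- def encode_progressivo(num: int) -> str:
--     """Converte un intero in 5 caratteri base36 (uppercase). Max 60.466.175."""
--     chars = "0123456789ABCDEFGHIJKLMNOPQRSTUVWXYZ"
--     if num < 0:
--         num = 0
--     out = ""
--     n = num
--     for _ in range(5):
--         out = chars[n % 36] + out
--         n //= 36
--     return out
-- ===== SOURCE B (Python) =====
-- def encode_progressivo(num: int) -> str:
--     """Converte un intero in 5 caratteri base36 (uppercase). Max 60.466.175."""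
--     chars = "0123456789ABCDEFGHIJKLMNOPQRSTUVWXYZ"
--     if num < 0:
--         num = 0
--     return "".join(chars[(num // 36 ** i) % 36] for i in range(4, -1, -1))
-- ===== Notes on version B (the rewrite author's own statement) =====
-- stated objective: alternative
-- what changed: Each of the 5 base36 digits is extracted independently by position via (num // 36**i) % 36 and joined MSB-to-LSB, instead of iteratively dividing a running quotient and prepending to an accumulated string.
import Mathlib
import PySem

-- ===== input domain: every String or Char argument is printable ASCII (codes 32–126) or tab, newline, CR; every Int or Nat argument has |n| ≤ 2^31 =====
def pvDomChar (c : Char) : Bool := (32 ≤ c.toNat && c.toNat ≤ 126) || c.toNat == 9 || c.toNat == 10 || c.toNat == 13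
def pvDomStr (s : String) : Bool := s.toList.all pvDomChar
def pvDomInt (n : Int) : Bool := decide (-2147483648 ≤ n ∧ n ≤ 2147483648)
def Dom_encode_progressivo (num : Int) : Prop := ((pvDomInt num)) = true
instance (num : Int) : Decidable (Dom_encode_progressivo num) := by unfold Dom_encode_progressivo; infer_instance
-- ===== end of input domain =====

-- B extracts each of the 5 base36 digits independently by position ((num // 36**i) % 36, MSB→LSB)
-- instead of A's running quotient with string prepending; same output, alternative decomposition.

-- ===== PORT A =====
-- A: running quotient, prepend chars[n % 36] five times, n //= 36.
def encode_progressivo (num : Int) : String :=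
  let chars := "0123456789ABCDEFGHIJKLMNOPQRSTUVWXYZ"
  let num := if num < 0 then (0 : Int) else num
  let st := (List.range 5).foldl
    (fun (st : String × Int) _ =>
      ((((PySem.Str.pyGet? chars (PySem.Int.mod st.2 36)).getD ' ').toString) ++ st.1,
       PySem.Int.floordiv st.2 36))
    ("", num)
  st.1

-- ===== PORT B =====
-- B: digit i (for i = 4,3,2,1,0) is chars[(num // 36^i) % 36]; join MSB→LSB.
def encode_progressivo_alt (num : Int) : String :=
  let chars := "0123456789ABCDEFGHIJKLMNOPQRSTUVWXYZ"
  let num := if num < 0 then (0 : Int) else num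
  String.join ((PySem.List.pyRange 4 (-1) (-1)).map
    (fun i => ((PySem.Str.pyGet? chars (PySem.Int.mod (PySem.Int.floordiv num (36 ^ i.toNat)) 36)).getD ' ').toString))

-- ===== PRECONDITION & SPEC =====
def Spec_encode_progressivo (num : Int) (out : String) : Prop := out = encode_progressivo_alt num
instance (num : Int) (out : String) : Decidable (Spec_encode_progressivo num out) := by unfold Spec_encode_progressivo; infer_instance

-- ===== CLAIM (what is proved, stated in full; the proofs are below) =====
def Claim_equal_encode_progressivo : Prop := ∀ (num : Int), Dom_encode_progressivo num → Spec_encode_progressivo num (encode_progressivo num)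

-- ===== LEMMAS AND PROOFS =====
theorem pv_floordiv_floordiv (n a b : Int) (ha : 0 < a) (hb : 0 < b) :
    PySem.Int.floordiv (PySem.Int.floordiv n a) b = PySem.Int.floordiv n (a * b) := by
  rw [PySem.Int.floordiv_eq_ediv_of_pos ha, PySem.Int.floordiv_eq_ediv_of_pos hb,
      PySem.Int.floordiv_eq_ediv_of_pos (mul_pos ha hb)]
  exact Int.ediv_ediv_of_nonneg (le_of_lt ha)

theorem pv_floordiv_one (n : Int) : PySem.Int.floordiv n 1 = n := by
  rw [PySem.Int.floordiv_eq_ediv_of_pos (by norm_num)]; exact Int.ediv_one n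

-- ===== VERDICT (by name: the statement is the Claim_ definition above) =====
theorem pv_range : PySem.List.pyRange 4 (-1) (-1) = [4, 3, 2, 1, 0] := by decide

theorem pv_fd2 (m : Int) : PySem.Int.floordiv (PySem.Int.floordiv m 36) 36 = PySem.Int.floordiv m 1296 := by
  rw [pv_floordiv_floordiv m 36 36 (by norm_num) (by norm_num)]; norm_num

theorem pv_fd3 (m : Int) : PySem.Int.floordiv (PySem.Int.floordiv m 1296) 36 = PySem.Int.floordiv m 46656 := by
  rw [pv_floordiv_floordiv m 1296 36 (by norm_num) (by norm_num)]; norm_num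

theorem pv_fd4 (m : Int) : PySem.Int.floordiv (PySem.Int.floordiv m 46656) 36 = PySem.Int.floordiv m 1679616 := by
  rw [pv_floordiv_floordiv m 46656 36 (by norm_num) (by norm_num)]; norm_num

theorem pv_pow4 : (36:Int) ^ Int.toNat 4 = 1679616 := by decide
theorem pv_pow3 : (36:Int) ^ Int.toNat 3 = 46656 := by decide
theorem pv_pow2 : (36:Int) ^ Int.toNat 2 = 1296 := by decide
theorem pv_pow1 : (36:Int) ^ Int.toNat 1 = 36 := by decide
theorem pv_pow0 : (36:Int) ^ Int.toNat 0 = 1 := by decide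

theorem encode_progressivo_spec : Claim_equal_encode_progressivo := by
  intro num _
  unfold Spec_encode_progressivo encode_progressivo encode_progressivo_alt
  rw [pv_range]
  simp only [List.range_succ, List.range_zero, List.nil_append, List.cons_append,
    List.foldl_cons, List.map, String.join, List.foldl,
    pv_pow4, pv_pow3, pv_pow2, pv_pow1, pv_pow0,
    pv_fd2, pv_fd3, pv_fd4, pv_floordiv_one,
    String.append_assoc, String.append_empty, String.empty_append]
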